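-- pv_equiv track=rewrite | github.com/studentPy35/Lesson2 | Lesson9/task_2.py | get_common_dict
-- ===== SOURCE A (Python) =====
-- from collections import defaultdict
--
-- def get_common_dict(first_dct: dict, second_dct: dict) -> dict:
--     """Функция принимает 2 словаря и возвращает словарь, где ключи -
--     ключи из обоих словарей, значения - список значений ключей в
--     словарях (1-я позиция для 1-ого словаря, вторая для 2-ого),
--     если ключа нет в словаре - возвращает значение None
--     """
--     dict_list = [first_dct, second_dct]
--     key_list = []
--     [key_list.append(key) for item in dict_list
--      for key in item.keys() if key not in key_list]
--     result = defaultdict(list)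
--     for item in dict_list:
--         for key in key_list:
--             result[key].append(item.get(key))
--
--     return dict(result)
-- ===== SOURCE B (Python) =====
-- def get_common_dict(first_dct: dict, second_dct: dict) -> dict:
--     """Merge by consuming the second dict: one pass over the first dict pops
--     each key's partner out of a copy of the second; a final pass over the
--     leftover (second-only) keys adds [None, value] entries. No key-union list
--     is ever built."""
--     rest = dict(second_dct)
--     result = {k: [v, rest.pop(k, None)] for k, v in first_dct.items()}
--     for k, v in rest.items():
--         result[k] = [None, v]
--     return result
-- ===== Notes on version B (the rewrite author's own statement) =====
-- stated objective: faster
-- what changed: Instead of A's explicit key-union list (quadratic membership scans) plus two dict-major append passes over a defaultdict, B never builds a key union: it consumes a copy of the second dict by pop while walking the first, then emits the leftover second-only keys, linear overall.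
import Mathlib
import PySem

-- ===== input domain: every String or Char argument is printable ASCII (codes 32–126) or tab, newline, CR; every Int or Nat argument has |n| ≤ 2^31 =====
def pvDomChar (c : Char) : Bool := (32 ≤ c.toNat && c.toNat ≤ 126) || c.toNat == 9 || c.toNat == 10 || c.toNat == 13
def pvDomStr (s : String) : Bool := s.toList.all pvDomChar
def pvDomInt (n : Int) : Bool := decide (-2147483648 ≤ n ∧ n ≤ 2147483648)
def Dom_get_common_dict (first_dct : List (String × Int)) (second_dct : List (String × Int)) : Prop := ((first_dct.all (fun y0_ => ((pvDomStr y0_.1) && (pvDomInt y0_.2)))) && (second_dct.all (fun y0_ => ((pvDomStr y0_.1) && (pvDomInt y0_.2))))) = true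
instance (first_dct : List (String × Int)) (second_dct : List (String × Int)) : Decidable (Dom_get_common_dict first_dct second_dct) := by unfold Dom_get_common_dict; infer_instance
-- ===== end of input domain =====

-- B drops A's explicit key-union list and its two dict-major append passes:
-- it consumes a copy of the second dict by pop while walking the first, then
-- emits the leftover second-only keys (faster: no list-membership scans).

-- ===== PORT A =====
-- A's dicts arrive as association lists; as in Python, dict construction keeps
-- first occurrence position with last value (PySem.Dict.ofList).
def get_common_dict (first_dct : List (String × Int)) (second_dct : List (String × Int)) : List (String × List (Option Int)) :=
  let d1 := PySem.Dict.ofList first_dct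
  let d2 := PySem.Dict.ofList second_dct
  let dict_list := [d1, d2]
  let key_list := dict_list.foldl (fun kl item =>
      item.keys.foldl (fun kl key => if kl.contains key then kl else kl ++ [key]) kl) []
  let result := dict_list.foldl (fun r item =>
      key_list.foldl (fun r key => r.modify key [] (fun l => l ++ [item.get? key])) r)
      PySem.Dict.empty
  result.items

-- ===== PORT B =====
def get_common_dict_alt (first_dct : List (String × Int)) (second_dct : List (String × Int)) : List (String × List (Option Int)) :=
  let rest0 := PySem.Dict.ofList second_dct
  -- dict comprehension over first_dct's items, threading `rest` (pop = get? + erase)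
  let pr := (PySem.Dict.ofList first_dct).items.foldl
      (fun (p : PySem.Dict String (List (Option Int)) × PySem.Dict String Int) kv =>
        (p.1.insert kv.1 [some kv.2, p.2.get? kv.1], p.2.erase kv.1))
      (PySem.Dict.empty, rest0)
  -- final pass over the leftover (second-only) items
  let result := pr.2.items.foldl (fun res kv => res.insert kv.1 [none, some kv.2]) pr.1
  result.items

-- ===== PRECONDITION & SPEC =====
def Spec_get_common_dict (first_dct : List (String × Int)) (second_dct : List (String × Int)) (out : List (String × List (Option Int))) : Prop := out = get_common_dict_alt first_dct second_dct
instance (first_dct : List (String × Int)) (second_dct : List (String × Int)) (out : List (String × List (Option Int))) : Decidable (Spec_get_common_dict first_dct second_dct out) := by unfold Spec_get_common_dict; infer_instance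

-- ===== CLAIM (what is proved, stated in full; the proofs are below) =====
def Claim_equal_get_common_dict : Prop := ∀ (first_dct : List (String × Int)) (second_dct : List (String × Int)), Dom_get_common_dict first_dct second_dct → Spec_get_common_dict first_dct second_dct (get_common_dict first_dct second_dct)

-- ===== LEMMAS AND PROOFS =====

-- Both sides are reduced to the same canonical value: the deduplicated key
-- union mapped to its [get?, get?] pair.
def pvCanon (first_dct second_dct : List (String × Int)) : List (String × List (Option Int)) :=
  let d1 := PySem.Dict.ofList first_dct
  let d2 := PySem.Dict.ofList second_dct
  (PySem.List.dedup (d1.keys ++ d2.keys)).map (fun k => (k, [d1.get? k, d2.get? k]))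

-- On a Nodup list, the filter for key c keeps exactly the pair built at c.
theorem pv_filter_map_nodup {β : Type} (f : String → β) (ks : List String)
    (hnd : ks.Nodup) (c : String) (hc : c ∈ ks) :
    (ks.map (fun k => (k, f k))).filter (fun p => p.1 == c) = [(c, f c)] := by
  induction ks with
  | nil => cases hc
  | cons a t ih =>
    simp only [List.map_cons, List.filter_cons]
    rcases List.mem_cons.mp hc with h | h
    · subst h
      simp only [beq_self_eq_true, if_pos]
      have hrest : (t.map (fun k => (k, f k))).filter (fun p => p.1 == c) = [] := by
        apply List.filter_eq_nil_iff.mpr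
        intro p hp
        simp only [List.mem_map] at hp
        obtain ⟨k, hk, rfl⟩ := hp
        have : k ≠ c := fun h => (List.nodup_cons.mp hnd).1 (h ▸ hk)
        simpa using this
      simp [hrest]
    · have hne : (a == c) = false := by
        have : a ≠ c := fun h' => (List.nodup_cons.mp hnd).1 (h' ▸ h)
        simpa using this
      simp only [hne, Bool.false_eq_true, if_neg, not_false_iff]
      exact ih (List.nodup_cons.mp hnd).2 h

-- One append pass of A's result loop, read through getD.
theorem pv_pass_getD (f : String → Option Int) (ks : List String) (hnd : ks.Nodup)
    (r : PySem.Dict String (List (Option Int))) (c : String) (hc : c ∈ ks) :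
    (ks.foldl (fun r k => r.modify k [] (fun l => l ++ [f k])) r).getD c []
      = r.getD c [] ++ [f c] := by
  have h1 : (ks.foldl (fun r k => r.modify k [] (fun l => l ++ [f k])) r)
      = ((ks.map (fun k => (k, f k))).foldl
          (fun d p => d.modify p.1 [] (fun l => l ++ [p.2])) r) := by
    rw [List.foldl_map]
  rw [h1, PySem.Dict.getD_foldl_modify_append, pv_filter_map_nodup f ks hnd c hc]
  simp

-- A equals the canonical value.
theorem pv_A_eq_canon (first_dct second_dct : List (String × Int)) :
    get_common_dict first_dct second_dct = pvCanon first_dct second_dct := by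
  unfold get_common_dict pvCanon
  simp only [List.foldl_cons, List.foldl_nil]
  set d1 := PySem.Dict.ofList first_dct with hd1
  set d2 := PySem.Dict.ofList second_dct with hd2
  have hkl : (d2.keys.foldl (fun kl key => if kl.contains key then kl else kl ++ [key])
        (d1.keys.foldl (fun kl key => if kl.contains key then kl else kl ++ [key]) []))
      = PySem.Set.ofList (d1.keys ++ d2.keys) := by
    show PySem.Set.update (PySem.Set.update [] d1.keys) d2.keys = _
    rw [PySem.Set.update_nil_left, PySem.Set.ofList_append]
  rw [hkl]
  set ks := PySem.Set.ofList (d1.keys ++ d2.keys) with hks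
  have hnd : ks.Nodup := PySem.Set.nodup_ofList _
  set p1 := ks.foldl (fun r key => r.modify key [] (fun l => l ++ [d1.get? key]))
      PySem.Dict.empty with hp1
  set p2 := ks.foldl (fun r key => r.modify key [] (fun l => l ++ [d2.get? key])) p1 with hp2
  have hk1 : p1.keys = ks := by
    rw [hp1, PySem.Dict.keys_foldl_modify ks [] (fun _ k l => l ++ [d1.get? k])]
    rw [PySem.Dict.keys_empty, PySem.Set.update_nil_left]
    exact PySem.Set.ofList_eq_self_of_nodup ks hnd
  have hk2 : p2.keys = ks := by
    rw [hp2, PySem.Dict.keys_foldl_modify ks [] (fun _ k l => l ++ [d2.get? k]), hk1]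
    rw [PySem.Set.update_eq_append_filter]
    have hfil : (PySem.Set.ofList ks).filter (fun y => !(PySem.Set.contains ks y)) = [] := by
      apply List.filter_eq_nil_iff.mpr
      intro y hy
      have : y ∈ ks := (PySem.Set.mem_ofList ks y).mp hy
      simp [PySem.Set.contains, this]
    simp
  have hnd2 : p2.keys.Nodup := hk2 ▸ hnd
  rw [PySem.Dict.items_eq_map_keys p2 hnd2 [], hk2, PySem.List.dedup_eq_ofList, ← hks]
  apply List.map_congr_left
  intro k hkmem
  have := pv_pass_getD (fun key => d2.get? key) ks hnd p1 k hkmem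
  rw [hp2] at *
  rw [this, hp1, pv_pass_getD (fun key => d1.get? key) ks hnd PySem.Dict.empty k hkmem]
  simp [PySem.Dict.getD_empty]

-- find? for key k' is unaffected by dropping the pairs keyed k ≠ k'.
theorem pv_find_filter {ν : Type} (l : List (String × ν)) (k k' : String) (h : k' ≠ k) :
    List.find? (fun p => p.1 == k') (l.filter (fun p => !(p.1 == k))) =
      List.find? (fun p => p.1 == k') l := by
  induction l with
  | nil => rfl
  | cons a t ih =>
    rw [List.filter_cons]
    by_cases hk : a.1 = k
    · have h1 : (!(a.1 == k)) = false := by simp [hk]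
      have h2 : (a.1 == k') = false := by simp [hk]; exact fun e => h (e ▸ hk ▸ rfl)
      simp only [h1, if_neg, Bool.false_eq_true, not_false_iff, List.find?_cons, h2, ih]
    · have h1 : (!(a.1 == k)) = true := by simp [hk]
      simp only [h1, if_pos, List.find?_cons]
      cases hc : (a.1 == k') with
      | true => rfl
      | false => exact ih

theorem pv_items_erase {ν : Type} (d : PySem.Dict String ν) (k : String) :
    (d.erase k).items = d.items.filter (fun p => !(p.1 == k)) := by
  obtain ⟨l⟩ := d; rfl

theorem pv_get?_erase_of_ne {ν : Type} (d : PySem.Dict String ν) (k k' : String) (h : k' ≠ k) :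
    (d.erase k).get? k' = d.get? k' := by
  obtain ⟨l⟩ := d
  simp only [PySem.Dict.erase, PySem.Dict.get?]
  rw [pv_find_filter l k k' h]

-- B's paired fold splits into two independent folds (keys of l are distinct,
-- so each pop reads the ORIGINAL rest).
theorem pv_pair_fold (l : List (String × Int)) (hnd : (l.map Prod.fst).Nodup)
    (res : PySem.Dict String (List (Option Int))) (rest : PySem.Dict String Int) :
    l.foldl (fun p kv => (p.1.insert kv.1 [some kv.2, p.2.get? kv.1], p.2.erase kv.1)) (res, rest)
    = (l.foldl (fun r kv => r.insert kv.1 [some kv.2, rest.get? kv.1]) res,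
       l.foldl (fun r kv => r.erase kv.1) rest) := by
  induction l generalizing res rest with
  | nil => rfl
  | cons a t ih =>
    simp only [List.map_cons, List.nodup_cons] at hnd
    simp only [List.foldl_cons]
    rw [ih hnd.2]
    have hcongr : t.foldl (fun r kv => r.insert kv.1 [some kv.2, (rest.erase a.1).get? kv.1])
          (res.insert a.1 [some a.2, rest.get? a.1])
        = t.foldl (fun r kv => r.insert kv.1 [some kv.2, rest.get? kv.1])
          (res.insert a.1 [some a.2, rest.get? a.1]) := by
      apply PySem.List.foldl_congr_mem
      intro acc kv hkv
      have hne : kv.1 ≠ a.1 := by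
        intro he
        exact hnd.1 (he ▸ List.mem_map_of_mem hkv)
      rw [pv_get?_erase_of_ne rest a.1 kv.1 hne]
    rw [hcongr]

-- erasing every key of ks filters the items down to the un-erased keys.
theorem pv_erase_fold_items {ν : Type} (ks : List String) (d : PySem.Dict String ν) :
    (ks.foldl (fun r k => r.erase k) d).items
      = d.items.filter (fun p => decide (p.1 ∉ ks)) := by
  induction ks generalizing d with
  | nil => simp
  | cons a t ih =>
    simp only [List.foldl_cons]
    rw [ih, pv_items_erase, List.filter_filter]
    apply List.filter_congr
    intro p _
    by_cases h1 : p.1 = a <;> by_cases h2 : p.1 ∈ t <;> simp [h1, h2]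

-- B equals the canonical value.
theorem pv_B_eq_canon (first_dct second_dct : List (String × Int)) :
    get_common_dict_alt first_dct second_dct = pvCanon first_dct second_dct := by
  unfold get_common_dict_alt pvCanon
  dsimp only
  set d1 := PySem.Dict.ofList first_dct with hd1
  set d2 := PySem.Dict.ofList second_dct with hd2
  have hnd1 : d1.keys.Nodup := PySem.Dict.nodup_keys_ofList first_dct
  have hnd2 : d2.keys.Nodup := PySem.Dict.nodup_keys_ofList second_dct
  have hkeys1 : d1.items.map (fun kv => kv.1) = d1.keys := rfl
  have hnd1' : (d1.items.map (fun kv => kv.1)).Nodup := hkeys1 ▸ hnd1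
  -- split the paired fold
  rw [pv_pair_fold d1.items hnd1' PySem.Dict.empty d2]
  set F1 := d1.items.foldl (fun r kv => r.insert kv.1 [some kv.2, d2.get? kv.1])
      PySem.Dict.empty with hF1
  set F2 := d1.items.foldl (fun r kv => r.erase kv.1) d2 with hF2
  -- F1's items: a loop over fresh distinct keys appends
  have hF1items : F1.items = d1.items.map (fun kv => (kv.1, [some kv.2, d2.get? kv.1])) := by
    rw [hF1, PySem.Dict.items_foldl_insert_fresh d1.items (fun kv => kv.1)
      (fun kv => [some kv.2, d2.get? kv.1]) PySem.Dict.empty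
      (fun a _ => PySem.Dict.contains_empty a.1) hnd1']
    simp [PySem.Dict.empty]
  -- F2's items: the second dict filtered down to the second-only keys
  have hF2items : F2.items = d2.items.filter (fun p => decide (p.1 ∉ d1.keys)) := by
    have hfold : d1.items.foldl (fun r kv => r.erase kv.1) d2
        = (d1.items.map (fun kv => kv.1)).foldl (fun r k => r.erase k) d2 := by
      rw [List.foldl_map]
    rw [hF2, hfold, pv_erase_fold_items, hkeys1]
  have hF2sub : F2.items.Sublist d2.items := hF2items ▸ List.filter_sublist
  have hndF2 : (F2.items.map (fun kv => kv.1)).Nodup :=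
    List.Sublist.nodup (List.Sublist.map (fun kv => kv.1) hF2sub) hnd2
  have hF1keys : F1.keys = d1.keys := by
    show F1.items.map _ = _
    rw [hF1items, List.map_map, ← hkeys1]
    rfl
  have hfresh : ∀ a ∈ F2.items, F1.contains a.1 = false := by
    intro a ha
    rw [hF2items] at ha
    have hnot : a.1 ∉ d1.keys := by
      have := List.of_mem_filter ha
      simpa using this
    rw [PySem.Dict.contains_eq_decide_mem_keys, hF1keys]
    simpa using hnot
  rw [PySem.Dict.items_foldl_insert_fresh F2.items (fun kv => kv.1)
      (fun kv => [none, some kv.2]) F1 hfresh hndF2]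
  -- canonical side: split the deduplicated union
  rw [PySem.List.dedup_eq_ofList, PySem.Set.ofList_append,
    PySem.Set.ofList_eq_self_of_nodup d1.keys hnd1, PySem.Set.update_eq_append_filter,
    PySem.Set.ofList_eq_self_of_nodup d2.keys hnd2, List.map_append]
  congr 1
  · -- first block: one entry per item of d1
    rw [hF1items, ← hkeys1, List.map_map]
    apply List.map_congr_left
    intro kv hkv
    have hget : d1.get? kv.1 = some kv.2 :=
      PySem.Dict.get?_of_mem_items d1 (by simpa using hkv) hnd1
    simp [Function.comp, hget]
  · -- second block: one entry per second-only item of d2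
    have hfil : d2.keys.filter (fun y => !PySem.Set.contains d1.keys y)
        = (d2.items.filter (fun p => decide (p.1 ∉ d1.keys))).map (fun kv => kv.1) := by
      show (d2.items.map (fun kv => kv.1)).filter _ = _
      rw [List.filter_map]
      congr 1
      apply List.filter_congr
      intro p _
      simp [PySem.Set.contains, Function.comp]
    rw [hfil, ← hF2items, List.map_map]
    apply List.map_congr_left
    intro kv hkv
    have hkv2 : kv ∈ d2.items.filter (fun p => decide (p.1 ∉ d1.keys)) := hF2items ▸ hkv
    have hmem : kv ∈ d2.items := List.mem_of_mem_filter hkv2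
    have hnot : kv.1 ∉ d1.keys := by
      have := List.of_mem_filter hkv2
      simpa using this
    have hget2 : d2.get? kv.1 = some kv.2 :=
      PySem.Dict.get?_of_mem_items d2 (by simpa using hmem) hnd2
    have hget1 : d1.get? kv.1 = none :=
      (PySem.Dict.get?_eq_none_iff_not_mem_keys d1 kv.1).mpr hnot
    simp [Function.comp, hget1, hget2]

-- ===== VERDICT (by name: the statement is the Claim_ definition above) =====
theorem get_common_dict_spec : Claim_equal_get_common_dict := by
  intro f s _
  show get_common_dict f s = get_common_dict_alt f s
  rw [pv_A_eq_canon, pv_B_eq_canon]
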